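-- pv_equiv track=rewrite | github.com/josefkarasek/cstats | cst.py | delete_backslash
-- ===== SOURCE A (Python) =====
-- def delete_backslash(file_content):
--     """
--     Odstraneni zpetnych lomitek (escape sekvenci).
--     Pred volanim teto metody je treba odstranit stringy.
--     """
--     INIT = 0
--     BACKSLASH = 1
--     state = INIT
--     final_string = ""
--
--     for char in file_content:
--         if state == INIT:
--             if char == '\\':
--                 state = BACKSLASH
--             else:
--                 final_string += char
--         elif state == BACKSLASH:
--             if char == '\n':
--                 state = INIT
--
--     return final_string
-- ===== SOURCE B (Python) =====
-- def delete_backslash(file_content):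
--     """Drop everything from each backslash through the next newline (inclusive),
--     or to the end of the string if no newline follows, using str.partition jumps."""
--     parts = []
--     rest = file_content
--     while True:
--         pre, sep, rest = rest.partition('\\')
--         parts.append(pre)
--         if not sep:
--             return ''.join(parts)
--         _skipped, sep2, rest = rest.partition('\n')
--         if not sep2:
--             return ''.join(parts)
-- ===== Notes on version B (the rewrite author's own statement) =====
-- stated objective: faster
-- what changed: Replaces the per-character two-state scanner building the result with += by str.partition jumps that copy whole chunks: copy the text before the next backslash, skip straight past the following newline, repeat until no backslash remains.
import Mathlib
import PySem

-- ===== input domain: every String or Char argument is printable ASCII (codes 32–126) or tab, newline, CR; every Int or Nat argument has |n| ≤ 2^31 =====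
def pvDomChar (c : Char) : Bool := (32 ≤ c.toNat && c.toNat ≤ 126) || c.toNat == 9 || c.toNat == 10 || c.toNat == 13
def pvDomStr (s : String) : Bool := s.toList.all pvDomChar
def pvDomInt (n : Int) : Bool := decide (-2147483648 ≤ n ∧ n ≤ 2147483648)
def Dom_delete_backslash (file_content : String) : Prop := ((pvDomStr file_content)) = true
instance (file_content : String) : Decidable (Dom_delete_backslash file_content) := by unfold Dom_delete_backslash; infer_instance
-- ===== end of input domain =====

-- B replaces A's per-character two-state scanner (+= per kept char) with str.partition
-- jumps copying whole chunks; measurably faster by constant factor (same O(n)).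

-- ===== PORT A =====
-- A: for char in file_content, two-state machine (INIT = 0, BACKSLASH = 1),
-- accumulating final_string (kept as List Char; String.mk at the end).
def delete_backslash (file_content : String) : String :=
  let r := file_content.toList.foldl
    (fun (st : Nat × List Char) char =>
      if st.1 = 0 then
        if char = '\\' then (1, st.2) else (0, st.2 ++ [char])
      else if st.1 = 1 then
        if char = '\n' then (0, st.2) else st
      else st)
    (0, [])
  String.mk r.2

-- ===== PORT B =====
-- B's loop: pre, sep, rest = rest.partition('\\')  →  takeWhile/dropWhile split;
-- then _, sep2, rest = rest.partition('\n') and continue after the newline.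
def pvAltGo (cs : List Char) : List Char :=
  let pre := cs.takeWhile (· ≠ '\\')
  let rest := cs.dropWhile (· ≠ '\\')
  if rest.isEmpty then pre
  else
    let rest2 := rest.tail.dropWhile (· ≠ '\n')
    if rest2.isEmpty then pre
    else pre ++ pvAltGo rest2.tail
termination_by cs.length
decreasing_by
  rename_i hrest hrest2
  have h1 : rest.length ≤ cs.length := List.length_dropWhile_le _ _
  have h2 : rest2.length ≤ rest.tail.length := List.length_dropWhile_le _ _
  have h1' : (cs.dropWhile (· ≠ '\\')).length ≤ cs.length := List.length_dropWhile_le _ _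
  have h2' : ((cs.dropWhile (· ≠ '\\')).tail.dropWhile (· ≠ '\n')).length ≤
      (cs.dropWhile (· ≠ '\\')).tail.length := List.length_dropWhile_le _ _
  simp only [List.isEmpty_iff, ← List.length_eq_zero_iff] at hrest hrest2
  simp only [List.length_tail] at *
  omega

def delete_backslash_alt (file_content : String) : String :=
  String.mk (pvAltGo file_content.toList)

-- ===== PRECONDITION & SPEC =====
def Spec_delete_backslash (file_content : String) (out : String) : Prop := out = delete_backslash_alt file_content
instance (file_content : String) (out : String) : Decidable (Spec_delete_backslash file_content out) := by unfold Spec_delete_backslash; infer_instance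

-- ===== CLAIM (what is proved, stated in full; the proofs are below) =====
def Claim_equal_delete_backslash : Prop := ∀ (file_content : String), Dom_delete_backslash file_content → Spec_delete_backslash file_content (delete_backslash file_content)

-- ===== LEMMAS AND PROOFS =====

-- A's state machine as a structural recursion (bs = true means state BACKSLASH).
def pvGoA (bs : Bool) : List Char → List Char
  | [] => []
  | c :: cs =>
    if bs then (if c = '\n' then pvGoA false cs else pvGoA true cs)
    else (if c = '\\' then pvGoA true cs else c :: pvGoA false cs)

-- the foldl of port A computes pvGoA
theorem pvFoldl_goA (cs : List Char) : ∀ (st : Nat) (acc : List Char), st = 0 ∨ st = 1 →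
    (cs.foldl (fun (st : Nat × List Char) char =>
      if st.1 = 0 then
        if char = '\\' then (1, st.2) else (0, st.2 ++ [char])
      else if st.1 = 1 then
        if char = '\n' then (0, st.2) else st
      else st) (st, acc)).2 = acc ++ pvGoA (st == 1) cs := by
  induction cs with
  | nil => rintro st acc (rfl | rfl) <;> simp [pvGoA]
  | cons c cs ih =>
    rintro st acc (rfl | rfl) <;> simp only [List.foldl_cons, pvGoA] <;> by_cases hb : c = '\\'
    · subst hb
      simp [ih 1 acc (Or.inr rfl)]
    · by_cases hn : c = '\n'
      · subst hn; simp [hb, ih 0 (acc ++ ['\n']) (Or.inl rfl)]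
      · simp [hb, ih 0 (acc ++ [c]) (Or.inl rfl)]
    · subst hb
      simp [ih 1 acc (Or.inr rfl)]
    · by_cases hn : c = '\n' <;> simp [hn, ih 0 acc (Or.inl rfl), ih 1 acc (Or.inr rfl)]

-- pvGoA in state INIT splits at the first backslash
theorem pvGoA_false_split (cs : List Char) :
    pvGoA false cs = cs.takeWhile (· ≠ '\\') ++
      (if (cs.dropWhile (· ≠ '\\')).isEmpty then []
       else pvGoA true (cs.dropWhile (· ≠ '\\')).tail) := by
  induction cs with
  | nil => simp [pvGoA]
  | cons c cs ih =>
    by_cases hb : c = '\\' <;>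
      simp [pvGoA, hb, ih]

-- pvGoA in state BACKSLASH skips to just past the first newline
theorem pvGoA_true_split (cs : List Char) :
    pvGoA true cs = (if (cs.dropWhile (· ≠ '\n')).isEmpty then []
       else pvGoA false (cs.dropWhile (· ≠ '\n')).tail) := by
  induction cs with
  | nil => simp [pvGoA]
  | cons c cs ih =>
    by_cases hn : c = '\n' <;> simp [pvGoA, hn, ih]

-- main: B's jump recursion equals A's state machine started in INIT
theorem pvAltGo_eq_goA (cs : List Char) : pvAltGo cs = pvGoA false cs := by
  induction hn : cs.length using Nat.strong_induction_on generalizing cs with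
  | _ n ih =>
  subst hn
  rw [pvAltGo.eq_def, pvGoA_false_split, pvGoA_true_split]
  simp only [ne_eq]
  split_ifs with h h2
  · simp
  · simp
  · have h1 : (cs.dropWhile (fun x => decide ¬x = '\\')).length ≤ cs.length :=
      List.length_dropWhile_le _ _
    have h2' : ((cs.dropWhile (fun x => decide ¬x = '\\')).tail.dropWhile
        (fun x => decide ¬x = '\n')).length ≤
        (cs.dropWhile (fun x => decide ¬x = '\\')).tail.length := List.length_dropWhile_le _ _
    simp only [List.isEmpty_iff, ← List.length_eq_zero_iff] at h h2
    have hlt : ((cs.dropWhile (fun x => decide ¬x = '\\')).tail.dropWhile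
        (fun x => decide ¬x = '\n')).tail.length < cs.length := by
      simp only [List.length_tail] at *; omega
    rw [ih _ hlt _ rfl]

-- ===== VERDICT (by name: the statement is the Claim_ definition above) =====
theorem delete_backslash_spec : Claim_equal_delete_backslash := by
  intro s _
  unfold Spec_delete_backslash
  simp only [delete_backslash, delete_backslash_alt]
  rw [pvFoldl_goA s.toList 0 [] (Or.inl rfl), pvAltGo_eq_goA]
  rfl
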